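-- pv_equiv track=rewrite | github.com/RyotaIwahashi/ClinicalTrialsSearch | new.py | build_snapshots
-- ===== SOURCE A (Python) =====
-- import copy
--
-- def build_snapshots(shapes, events):
--     """
--     events: [(step_serial, spid, visible), …]  で昇順に並んでいる前提。
--     """
--     state = {spid: True for spid in shapes}
--
--     # 出現アニメの初回は最初は非表示に
--     first_change = {}
--     for _, spid, vis in events:
--         if spid not in first_change:
--             first_change[spid] = vis
--             if vis:
--                 state[spid] = False
--
--     snapshots = [copy.deepcopy(state)]  # step0（初期）
--
--     current_step = -1
--     for step_serial, spid, visible in events: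
--         if step_serial != current_step:
--             if current_step != -1:  # -1 は初期
--                 snapshots.append(copy.deepcopy(state))
--             current_step = step_serial
--         state[spid] = visible
--
--     snapshots.append(copy.deepcopy(state))  # 最終状態
--     return snapshots
-- ===== SOURCE B (Python) =====
-- def build_snapshots(shapes, events):
--     """
--     events: [(step_serial, spid, visible), …] grouped by consecutive equal step_serial.
--     """
--     state = dict.fromkeys(shapes, True)
--
--     # a shape whose first event makes it appear starts out hidden
--     seen = set()
--     for _, spid, vis in events:
--         if spid not in seen:
--             seen.add(spid)
--             if vis:
--                 state[spid] = False
--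
--     # split events into runs of equal step_serial
--     runs = []
--     i, n = 0, len(events)
--     while i < n:
--         j = i
--         while j < n and events[j][0] == events[i][0]:
--             j += 1
--         runs.append(events[i:j])
--         i = j
--
--     snapshots = [dict(state)]  # step0 (initial)
--     for run in runs:
--         for _, spid, visible in run:
--             state[spid] = visible
--         snapshots.append(dict(state))
--     if len(snapshots) == 1:  # no events: the final state is the initial one
--         snapshots.append(dict(state))
--     return snapshots
-- ===== Notes on version B (the rewrite author's own statement) =====
-- stated objective: alternative
-- what changed: The sentinel-driven single pass (current_step = -1, append-before-boundary) is replaced by an explicit pass that splits the events into runs of equal step_serial and then appends one snapshot after applying each run, with a set instead of the unused first_change dict and dict(state) instead of deepcopy.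
-- intended difference: On event lists where some event with step_serial -1 is followed by an event with a different step, A's -1 collides with its 'initial' sentinel and A silently drops the snapshot after that -1 step, while B returns the full snapshot list with one snapshot per step group, which is the intended behaviour. — e.g. on build_snapshots(["a"], [(-1, "a", false), (0, "a", true)]): A returns [[("a", true)], [("a", true)]], B returns [[("a", true)], [("a", false)], [("a", true)]]
import Mathlib
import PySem

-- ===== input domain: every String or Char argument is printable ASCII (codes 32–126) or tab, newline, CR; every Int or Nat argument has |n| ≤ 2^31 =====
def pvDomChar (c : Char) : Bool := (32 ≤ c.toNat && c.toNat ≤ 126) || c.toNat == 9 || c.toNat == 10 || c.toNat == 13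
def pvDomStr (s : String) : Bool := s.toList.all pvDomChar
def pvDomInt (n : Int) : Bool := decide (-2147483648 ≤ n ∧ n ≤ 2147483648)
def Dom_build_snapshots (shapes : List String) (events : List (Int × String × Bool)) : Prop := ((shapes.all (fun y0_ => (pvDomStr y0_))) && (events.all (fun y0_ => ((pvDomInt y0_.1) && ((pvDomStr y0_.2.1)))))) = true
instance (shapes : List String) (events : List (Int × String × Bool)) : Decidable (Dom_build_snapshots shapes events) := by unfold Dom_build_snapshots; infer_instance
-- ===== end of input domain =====

-- B replaces A's sentinel-driven single pass by an explicit run-splitting pass (alternative decomposition);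
-- neither program mutates its arguments.

-- ===== PORT A =====
def build_snapshots (shapes : List String) (events : List (Int × String × Bool)) : List (List (String × Bool)) :=
  let state := shapes.foldl (fun d spid => d.insert spid true) (PySem.Dict.empty : PySem.Dict String Bool)
  -- first pass: a shape whose first event shows it starts hidden
  let p := events.foldl
    (fun (p : PySem.Dict String Bool × PySem.Dict String Bool) e =>
      if p.1.contains e.2.1 then p
      else (p.1.insert e.2.1 e.2.2, if e.2.2 then p.2.insert e.2.1 false else p.2))
    ((PySem.Dict.empty : PySem.Dict String Bool), state)
  let state := p.2
  let snapshots : List (List (String × Bool)) := [state.items]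
  -- second pass: current_step sentinel -1, append before each new step
  let t := events.foldl
    (fun (t : Int × List (List (String × Bool)) × PySem.Dict String Bool) e =>
      let snaps := if e.1 != t.1 then (if t.1 != -1 then t.2.1 ++ [t.2.2.items] else t.2.1) else t.2.1
      let cur := if e.1 != t.1 then e.1 else t.1
      (cur, snaps, t.2.2.insert e.2.1 e.2.2))
    (-1, snapshots, state)
  t.2.1 ++ [t.2.2.items]

-- ===== PORT B =====
-- Source B's while-loop slicing events into runs of equal step_serial (fuel = remaining length, like the index bound i < n)
def pvRunsAux : Nat → List (Int × String × Bool) → List (List (Int × String × Bool))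
  | _, [] => []
  | 0, _ :: _ => []
  | n + 1, e :: es => (e :: es.takeWhile (fun x => x.1 == e.1)) :: pvRunsAux n (es.dropWhile (fun x => x.1 == e.1))

def pvRuns (events : List (Int × String × Bool)) : List (List (Int × String × Bool)) :=
  pvRunsAux events.length events

def build_snapshots_alt (shapes : List String) (events : List (Int × String × Bool)) : List (List (String × Bool)) :=
  let state := shapes.foldl (fun d spid => d.insert spid true) (PySem.Dict.empty : PySem.Dict String Bool)
  let p := events.foldl
    (fun (p : PySem.Set String × PySem.Dict String Bool) e =>
      if PySem.Set.contains p.1 e.2.1 then p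
      else (PySem.Set.add p.1 e.2.1, if e.2.2 then p.2.insert e.2.1 false else p.2))
    ((PySem.Set.empty : PySem.Set String), state)
  let state := p.2
  let q := (pvRuns events).foldl
    (fun (q : PySem.Dict String Bool × List (List (String × Bool))) run =>
      let st := run.foldl (fun st e => st.insert e.2.1 e.2.2) q.1
      (st, q.2 ++ [st.items]))
    (state, [state.items])
  if q.2.length == 1 then q.2 ++ [q.1.items] else q.2

-- ===== PRECONDITION & SPEC =====
-- On event lists where some step_serial -1 event is followed by an event with a different step, A's
-- internal 'initial' sentinel -1 collides with the real step and A silently drops the snapshot after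
-- that -1 step; B returns the full list with one snapshot per step group, the intended behaviour.
def D_build_snapshots (shapes : List String) (events : List (Int × String × Bool)) : Prop :=
  ¬ events.Pairwise (fun a b => a.1 = -1 → b.1 = -1)
instance (shapes : List String) (events : List (Int × String × Bool)) : Decidable (D_build_snapshots shapes events) := by unfold D_build_snapshots; infer_instance

def Spec_build_snapshots (shapes : List String) (events : List (Int × String × Bool)) (out : List (List (String × Bool))) : Prop := ¬ D_build_snapshots shapes events → out = build_snapshots_alt shapes events
instance (shapes : List String) (events : List (Int × String × Bool)) (out : List (List (String × Bool))) : Decidable (Spec_build_snapshots shapes events out) := by unfold Spec_build_snapshots; infer_instance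

def pvDiffWitness_build_snapshots : List String × (List (Int × String × Bool)) :=
  (["a"], [(-1, "a", false), (0, "a", true)])
def pvDiffWitnessOut_build_snapshots : (List (List (String × Bool))) × (List (List (String × Bool))) :=
  ([[("a", true)], [("a", true)]], [[("a", true)], [("a", false)], [("a", true)]])

-- ===== CLAIM (what is proved, stated in full; the proofs are below) =====
def Claim_unchanged_build_snapshots : Prop := ∀ (shapes : List String) (events : List (Int × String × Bool)), Dom_build_snapshots shapes events → Spec_build_snapshots shapes events (build_snapshots shapes events)
def Claim_exact_build_snapshots : Prop := ∀ (shapes : List String) (events : List (Int × String × Bool)), Dom_build_snapshots shapes events → D_build_snapshots shapes events → build_snapshots shapes events ≠ build_snapshots_alt shapes events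
def Claim_changed_build_snapshots : Prop := Dom_build_snapshots (pvDiffWitness_build_snapshots.1) (pvDiffWitness_build_snapshots.2) ∧ D_build_snapshots (pvDiffWitness_build_snapshots.1) (pvDiffWitness_build_snapshots.2) ∧ build_snapshots (pvDiffWitness_build_snapshots.1) (pvDiffWitness_build_snapshots.2) = pvDiffWitnessOut_build_snapshots.1 ∧ build_snapshots_alt (pvDiffWitness_build_snapshots.1) (pvDiffWitness_build_snapshots.2) = pvDiffWitnessOut_build_snapshots.2 ∧ pvDiffWitnessOut_build_snapshots.1 ≠ pvDiffWitnessOut_build_snapshots.2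

-- ===== LEMMAS AND PROOFS =====

-- the state after the initial dict comprehension
def pvState0 (shapes : List String) : PySem.Dict String Bool :=
  shapes.foldl (fun d spid => d.insert spid true) PySem.Dict.empty

-- the state after A's first pass / B's first pass
def pvStA (shapes : List String) (events : List (Int × String × Bool)) : PySem.Dict String Bool :=
  (events.foldl
    (fun (p : PySem.Dict String Bool × PySem.Dict String Bool) e =>
      if p.1.contains e.2.1 then p
      else (p.1.insert e.2.1 e.2.2, if e.2.2 then p.2.insert e.2.1 false else p.2))
    (PySem.Dict.empty, pvState0 shapes)).2

def pvStB (shapes : List String) (events : List (Int × String × Bool)) : PySem.Dict String Bool :=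
  (events.foldl
    (fun (p : PySem.Set String × PySem.Dict String Bool) e =>
      if PySem.Set.contains p.1 e.2.1 then p
      else (PySem.Set.add p.1 e.2.1, if e.2.2 then p.2.insert e.2.1 false else p.2))
    (PySem.Set.empty, pvState0 shapes)).2

-- A's second loop as a structural recursion (cur is the current_step sentinel)
def pvATail (cur : Int) (st : PySem.Dict String Bool) : List (Int × String × Bool) → List (List (String × Bool))
  | [] => [st.items]
  | e :: es =>
    if e.1 = cur then pvATail cur (st.insert e.2.1 e.2.2) es
    else (if cur = -1 then [] else [st.items]) ++ pvATail e.1 (st.insert e.2.1 e.2.2) es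

-- the sentinel-free version: emit the pending state at every step boundary
def pvRTail (cur : Int) (st : PySem.Dict String Bool) : List (Int × String × Bool) → List (List (String × Bool))
  | [] => [st.items]
  | e :: es =>
    if e.1 = cur then pvRTail cur (st.insert e.2.1 e.2.2) es
    else st.items :: pvRTail e.1 (st.insert e.2.1 e.2.2) es

-- B's run loop as a structural recursion
def pvGTail (st : PySem.Dict String Bool) : List (List (Int × String × Bool)) → List (List (String × Bool))
  | [] => []
  | g :: gs => ((g.foldl (fun st e => st.insert e.2.1 e.2.2) st).items) ::
      pvGTail (g.foldl (fun st e => st.insert e.2.1 e.2.2) st) gs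

theorem pvRunsAux_congr : ∀ (m n : Nat) (es : List (Int × String × Bool)),
    es.length ≤ m → es.length ≤ n → pvRunsAux m es = pvRunsAux n es := by
  intro m
  induction m with
  | zero =>
    intro n es hm _
    cases es with
    | nil => cases n <;> rfl
    | cons e es => simp at hm
  | succ k ih =>
    intro n es hm hn
    cases es with
    | nil => cases n <;> rfl
    | cons e es =>
      cases n with
      | zero => simp at hn
      | succ n' =>
        simp only [pvRunsAux]
        congr 1
        apply ih
        · exact le_trans (List.length_dropWhile_le _ _) (by simp at hm; omega)
        · exact le_trans (List.length_dropWhile_le _ _) (by simp at hn; omega)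

theorem pvRuns_cons (e : Int × String × Bool) (es : List (Int × String × Bool)) :
    pvRuns (e :: es) = (e :: es.takeWhile (fun x => x.1 == e.1)) ::
      pvRuns (es.dropWhile (fun x => x.1 == e.1)) := by
  show pvRunsAux (e :: es).length (e :: es) = _
  simp only [List.length_cons, pvRunsAux]
  congr 1
  exact pvRunsAux_congr _ _ _ (List.length_dropWhile_le _ _) (le_refl _)

theorem pvFirstPass_eq : ∀ (es : List (Int × String × Bool)) (fc : PySem.Dict String Bool)
    (seen : PySem.Set String) (st : PySem.Dict String Bool),
    (∀ k, fc.contains k = PySem.Set.contains seen k) →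
    (es.foldl
      (fun (p : PySem.Dict String Bool × PySem.Dict String Bool) e =>
        if p.1.contains e.2.1 then p
        else (p.1.insert e.2.1 e.2.2, if e.2.2 then p.2.insert e.2.1 false else p.2))
      (fc, st)).2
    = (es.foldl
      (fun (p : PySem.Set String × PySem.Dict String Bool) e =>
        if PySem.Set.contains p.1 e.2.1 then p
        else (PySem.Set.add p.1 e.2.1, if e.2.2 then p.2.insert e.2.1 false else p.2))
      (seen, st)).2 := by
  intro es
  induction es with
  | nil => intro fc seen st h; rfl
  | cons e es ih =>
    intro fc seen st h
    simp only [List.foldl_cons]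
    rw [h e.2.1]
    by_cases hc : PySem.Set.contains seen e.2.1 = true
    · rw [if_pos hc, if_pos hc]
      exact ih fc seen st h
    · rw [if_neg hc, if_neg hc]
      apply ih
      intro k
      rw [PySem.Dict.contains_insert, h k, Bool.eq_iff_iff]
      simp only [Bool.or_eq_true, beq_iff_eq, PySem.Set.contains_iff, PySem.Set.mem_add]
      tauto

theorem pvALoop_eq : ∀ (es : List (Int × String × Bool)) (cur : Int)
    (snaps : List (List (String × Bool))) (st : PySem.Dict String Bool),
    (es.foldl
      (fun (t : Int × List (List (String × Bool)) × PySem.Dict String Bool) e =>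
        let snaps := if e.1 != t.1 then (if t.1 != -1 then t.2.1 ++ [t.2.2.items] else t.2.1) else t.2.1
        let cur := if e.1 != t.1 then e.1 else t.1
        (cur, snaps, t.2.2.insert e.2.1 e.2.2))
      (cur, snaps, st)).2.1 ++
    [(es.foldl
      (fun (t : Int × List (List (String × Bool)) × PySem.Dict String Bool) e =>
        let snaps := if e.1 != t.1 then (if t.1 != -1 then t.2.1 ++ [t.2.2.items] else t.2.1) else t.2.1
        let cur := if e.1 != t.1 then e.1 else t.1
        (cur, snaps, t.2.2.insert e.2.1 e.2.2))
      (cur, snaps, st)).2.2.items] = snaps ++ pvATail cur st es := by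
  intro es
  induction es with
  | nil => intro cur snaps st; simp [pvATail]
  | cons e es ih =>
    intro cur snaps st
    simp only [List.foldl_cons]
    by_cases he : e.1 = cur
    · have hb : (e.1 != cur) = false := by simp [he]
      simp only [hb, Bool.false_eq_true, if_false, pvATail, if_pos he]
      exact ih cur snaps (st.insert e.2.1 e.2.2)
    · have hb : (e.1 != cur) = true := by simp [bne_iff_ne, he]
      by_cases hc : cur = -1
      · have hb2 : (cur != -1) = false := by simp [hc]
        simp only [hb, if_true, hb2, Bool.false_eq_true, if_false, pvATail,
          if_neg he, if_pos hc, List.nil_append]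
        exact ih e.1 snaps (st.insert e.2.1 e.2.2)
      · have hb2 : (cur != -1) = true := by simp [bne_iff_ne, hc]
        simp only [hb, if_true, hb2, pvATail, if_neg he, if_neg hc]
        rw [ih e.1 (snaps ++ [st.items]) (st.insert e.2.1 e.2.2)]
        simp [List.append_assoc]

theorem pvBLoop_eq : ∀ (gs : List (List (Int × String × Bool)))
    (st : PySem.Dict String Bool) (snaps : List (List (String × Bool))),
    (gs.foldl
      (fun (q : PySem.Dict String Bool × List (List (String × Bool))) run =>
        let st := run.foldl (fun st e => st.insert e.2.1 e.2.2) q.1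
        (st, q.2 ++ [st.items]))
      (st, snaps)).2 = snaps ++ pvGTail st gs := by
  intro gs
  induction gs with
  | nil => intro st snaps; simp [pvGTail]
  | cons g gs ih =>
    intro st snaps
    simp only [List.foldl_cons]
    rw [ih]
    simp [pvGTail, List.append_assoc]

theorem pvATail_eq_pvRTail : ∀ (es : List (Int × String × Bool)) (cur : Int)
    (st : PySem.Dict String Bool),
    es.Pairwise (fun a b => a.1 = -1 → b.1 = -1) →
    (cur = -1 → ∀ e ∈ es, e.1 = -1) →
    pvATail cur st es = pvRTail cur st es := by
  intro es
  induction es with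
  | nil => intro cur st _ _; rfl
  | cons e es ih =>
    intro cur st hp hq
    rw [List.pairwise_cons] at hp
    by_cases he : e.1 = cur
    · simp only [pvATail, pvRTail, if_pos he]
      exact ih cur (st.insert e.2.1 e.2.2) hp.2
        (fun hc x hx => hq hc x (List.mem_cons_of_mem _ hx))
    · have hcur : cur ≠ -1 := by
        intro hc
        exact he ((hq hc e (List.mem_cons_self ..)).trans hc.symm)
      simp only [pvATail, pvRTail, if_neg he, if_neg hcur, List.singleton_append]
      congr 1
      exact ih e.1 (st.insert e.2.1 e.2.2) hp.2 (fun h1 x hx => hp.1 x hx h1)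

theorem pvRTail_ne_nil : ∀ (es : List (Int × String × Bool)) (cur : Int)
    (st : PySem.Dict String Bool), pvRTail cur st es ≠ [] := by
  intro es
  induction es with
  | nil => intro cur st h; simp [pvRTail] at h
  | cons e es ih =>
    intro cur st
    simp only [pvRTail]
    by_cases he : e.1 = cur
    · rw [if_pos he]; exact ih cur (st.insert e.2.1 e.2.2)
    · rw [if_neg he]; simp

theorem pvGTail_runs_eq : ∀ (es : List (Int × String × Bool)) (st : PySem.Dict String Bool)
    (e : Int × String × Bool),
    pvGTail st (pvRuns (e :: es)) = pvRTail e.1 (st.insert e.2.1 e.2.2) es := by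
  intro es
  induction es with
  | nil =>
    intro st e
    rw [pvRuns_cons]
    simp [pvRuns, pvRunsAux, pvGTail, pvRTail]
  | cons e2 es ih =>
    intro st e
    by_cases h2 : e2.1 = e.1
    · have htw : List.takeWhile (fun x => x.1 == e.1) (e2 :: es) =
          e2 :: List.takeWhile (fun x => x.1 == e.1) es := by
        simp [h2]
      have hdw : List.dropWhile (fun x => x.1 == e.1) (e2 :: es) =
          List.dropWhile (fun x => x.1 == e.1) es := by
        simp [h2]
      rw [pvRuns_cons, htw, hdw]
      have ih' := ih (st.insert e.2.1 e.2.2) e2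
      rw [pvRuns_cons] at ih'
      simp only [h2] at ih'
      simp only [pvRTail]
      rw [if_pos h2]
      simp only [pvGTail, List.foldl_cons] at ih' ⊢
      exact ih'
    · have htw : List.takeWhile (fun x => x.1 == e.1) (e2 :: es) = [] := by
        simp [h2]
      have hdw : List.dropWhile (fun x => x.1 == e.1) (e2 :: es) = e2 :: es := by
        simp [h2]
      rw [pvRuns_cons, htw, hdw]
      simp only [pvGTail, List.foldl_cons, List.foldl_nil]
      rw [ih (st.insert e.2.1 e.2.2) e2]
      simp only [pvRTail]
      rw [if_neg h2]

theorem pvA_char : ∀ (shapes : List String) (events : List (Int × String × Bool)),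
    build_snapshots shapes events
      = (pvStA shapes events).items :: pvATail (-1) (pvStA shapes events) events := by
  intro shapes events
  exact pvALoop_eq events (-1) [(pvStA shapes events).items] (pvStA shapes events)

theorem pvSt_eq : ∀ (shapes : List String) (events : List (Int × String × Bool)),
    pvStA shapes events = pvStB shapes events := by
  intro shapes events
  exact pvFirstPass_eq events PySem.Dict.empty PySem.Set.empty (pvState0 shapes)
    (fun k => by simp [PySem.Set.empty])

theorem pvBif : ∀ (st : PySem.Dict String Bool) (e : Int × String × Bool)
    (es : List (Int × String × Bool)),
    (let q := (pvRuns (e :: es)).foldl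
      (fun (q : PySem.Dict String Bool × List (List (String × Bool))) run =>
        let st := run.foldl (fun st e => st.insert e.2.1 e.2.2) q.1
        (st, q.2 ++ [st.items]))
      (st, [st.items])
     if q.2.length == 1 then q.2 ++ [q.1.items] else q.2)
    = st.items :: pvRTail e.1 (st.insert e.2.1 e.2.2) es := by
  intro st e es
  dsimp only
  rw [pvBLoop_eq, pvGTail_runs_eq]
  cases hpv : pvRTail e.1 (st.insert e.2.1 e.2.2) es with
  | nil => exact absurd hpv (pvRTail_ne_nil es e.1 (st.insert e.2.1 e.2.2))
  | cons a l => simp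

theorem pvB_char : ∀ (shapes : List String) (e : Int × String × Bool)
    (es : List (Int × String × Bool)),
    build_snapshots_alt shapes (e :: es)
      = (pvStB shapes (e :: es)).items ::
        pvRTail e.1 ((pvStB shapes (e :: es)).insert e.2.1 e.2.2) es := by
  intro shapes e es
  exact pvBif (pvStB shapes (e :: es)) e es

-- ===== VERDICT (by name: the statement is the Claim_ definition above) =====
theorem build_snapshots_spec : Claim_unchanged_build_snapshots := by
  intro shapes events _hdom
  unfold Spec_build_snapshots
  intro hnd
  unfold D_build_snapshots at hnd
  have hpw := not_not.mp hnd
  cases events with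
  | nil => rfl
  | cons e es =>
    rw [pvA_char, pvB_char, pvSt_eq]
    rw [List.pairwise_cons] at hpw
    congr 1
    by_cases he : e.1 = -1
    · simp only [pvATail, if_pos he]
      rw [pvATail_eq_pvRTail es (-1) _ hpw.2 (fun _ x hx => hpw.1 x hx he), he]
    · simp only [pvATail, if_neg he]
      exact pvATail_eq_pvRTail es e.1 _ hpw.2 (fun h1 => absurd h1 he)

-- lengths of the two tails: A emits nothing at a boundary reached with cur = -1, R always emits
def pvALen (cur : Int) : List (Int × String × Bool) → Nat
  | [] => 1
  | e :: es => if e.1 = cur then pvALen cur es else (if cur = -1 then 0 else 1) + pvALen e.1 es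

def pvRLen (cur : Int) : List (Int × String × Bool) → Nat
  | [] => 1
  | e :: es => if e.1 = cur then pvRLen cur es else 1 + pvRLen e.1 es

theorem pvATail_length : ∀ (es : List (Int × String × Bool)) (cur : Int)
    (st : PySem.Dict String Bool), (pvATail cur st es).length = pvALen cur es := by
  intro es
  induction es with
  | nil => intro cur st; rfl
  | cons e es ih =>
    intro cur st
    by_cases he : e.1 = cur
    · simp only [pvATail, pvALen, if_pos he]; exact ih cur _
    · by_cases hc : cur = -1
      · simp only [pvATail, pvALen, if_neg he, if_pos hc, List.nil_append, Nat.zero_add]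
        exact ih e.1 _
      · simp only [pvATail, pvALen, if_neg he, if_neg hc, List.singleton_append,
          List.length_cons]
        rw [ih e.1 _]
        omega

theorem pvRTail_length : ∀ (es : List (Int × String × Bool)) (cur : Int)
    (st : PySem.Dict String Bool), (pvRTail cur st es).length = pvRLen cur es := by
  intro es
  induction es with
  | nil => intro cur st; rfl
  | cons e es ih =>
    intro cur st
    by_cases he : e.1 = cur
    · simp only [pvRTail, pvRLen, if_pos he]; exact ih cur _
    · simp only [pvRTail, pvRLen, if_neg he, List.length_cons]
      rw [ih e.1 _]
      omega

theorem pvALen_le : ∀ (es : List (Int × String × Bool)) (cur : Int),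
    pvALen cur es ≤ pvRLen cur es := by
  intro es
  induction es with
  | nil => intro cur; exact le_refl _
  | cons e es ih =>
    intro cur
    by_cases he : e.1 = cur
    · simp only [pvALen, pvRLen, if_pos he]; exact ih cur
    · simp only [pvALen, pvRLen, if_neg he]
      have := ih e.1
      by_cases hc : cur = -1 <;> simp [hc] <;> omega

theorem pvALen_lt : ∀ (es : List (Int × String × Bool)) (cur : Int),
    ¬ (es.Pairwise (fun a b => a.1 = -1 → b.1 = -1) ∧ (cur = -1 → ∀ e ∈ es, e.1 = -1)) →
    pvALen cur es < pvRLen cur es := by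
  intro es
  induction es with
  | nil =>
    intro cur h
    exact absurd ⟨List.Pairwise.nil, fun _ e he => absurd he (by simp)⟩ h
  | cons e es ih =>
    intro cur h
    by_cases he : e.1 = cur
    · simp only [pvALen, pvRLen, if_pos he]
      apply ih
      rintro ⟨hp, hq⟩
      apply h
      refine ⟨List.pairwise_cons.mpr ⟨fun b hb h1 => hq (he ▸ h1) b hb, hp⟩, ?_⟩
      intro hc x hx
      rcases List.mem_cons.mp hx with rfl | hx'
      · exact he.trans hc
      · exact hq hc x hx'
    · by_cases hc : cur = -1
      · simp only [pvALen, pvRLen, if_neg he, if_pos hc]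
        have := pvALen_le es e.1
        omega
      · simp only [pvALen, pvRLen, if_neg he, if_neg hc]
        have hq : ¬ (es.Pairwise (fun a b => a.1 = -1 → b.1 = -1) ∧
            (e.1 = -1 → ∀ x ∈ es, x.1 = -1)) := by
          rintro ⟨hp, hq2⟩
          apply h
          exact ⟨List.pairwise_cons.mpr ⟨fun b hb h1 => hq2 h1 b hb, hp⟩,
            fun h1 => absurd h1 hc⟩
        have := ih e.1 hq
        omega

theorem build_snapshots_tight : Claim_exact_build_snapshots := by
  intro shapes events _hdom hd
  unfold D_build_snapshots at hd
  cases events with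
  | nil => exact absurd List.Pairwise.nil hd
  | cons e es =>
    intro heq
    rw [pvA_char, pvB_char, pvSt_eq] at heq
    have hlen := congrArg List.length heq
    simp only [List.length_cons, pvATail_length, pvRTail_length] at hlen
    have hstrict : pvALen (-1) (e :: es) < pvRLen e.1 es := by
      by_cases he : e.1 = -1
      · simp only [pvALen, if_pos he]
        have hq : ¬ (es.Pairwise (fun a b => a.1 = -1 → b.1 = -1) ∧
            ((-1 : Int) = -1 → ∀ x ∈ es, x.1 = -1)) := by
          rintro ⟨hp, hq⟩
          exact hd (List.pairwise_cons.mpr ⟨fun b hb _ => hq rfl b hb, hp⟩)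
        have h1 := pvALen_lt es (-1) hq
        have h2 : pvRLen (-1) es = pvRLen e.1 es := by rw [he]
        omega
      · simp only [pvALen, if_neg he]
        norm_num
        have hq : ¬ (es.Pairwise (fun a b => a.1 = -1 → b.1 = -1) ∧
            (e.1 = -1 → ∀ x ∈ es, x.1 = -1)) := by
          rintro ⟨hp, hq2⟩
          exact hd (List.pairwise_cons.mpr ⟨fun b hb h1 => hq2 h1 b hb, hp⟩)
        have := pvALen_lt es e.1 hq
        omega
    omega

theorem build_snapshots_changed : Claim_changed_build_snapshots := by
  unfold Claim_changed_build_snapshots; decide
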